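-- pv_equiv track=rewrite | github.com/seanmchu/algo-research | matching/diversity_testing.py | avgg
-- ===== SOURCE A (Python) =====
-- def avgg(s,pl):
--     s2 = []
--     for i in range(len(pl)):
--         for ss in s:
--             if (ss == pl[i]):
--                 s2.append(i+1)
--     s2.sort()
--     return s2
-- ===== SOURCE B (Python) =====
-- def avgg(s, pl):
--     table = {}
--     for i, v in enumerate(pl):
--         table.setdefault(v, []).append(i + 1)
--     out = []
--     for ss in s:
--         out.extend(table.get(ss, []))
--     out.sort()
--     return out
-- ===== Notes on version B (the rewrite author's own statement) =====
-- stated objective: alternative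
-- what changed: Inverts the traversal: one pass over pl builds a value-to-1-based-index-list table, then a single pass over s emits table[ss] per element (instead of scanning s once per pl index), keeping the final sort; the output/sort cost dominates on duplicate-heavy inputs, so no speed is claimed.
import Mathlib
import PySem

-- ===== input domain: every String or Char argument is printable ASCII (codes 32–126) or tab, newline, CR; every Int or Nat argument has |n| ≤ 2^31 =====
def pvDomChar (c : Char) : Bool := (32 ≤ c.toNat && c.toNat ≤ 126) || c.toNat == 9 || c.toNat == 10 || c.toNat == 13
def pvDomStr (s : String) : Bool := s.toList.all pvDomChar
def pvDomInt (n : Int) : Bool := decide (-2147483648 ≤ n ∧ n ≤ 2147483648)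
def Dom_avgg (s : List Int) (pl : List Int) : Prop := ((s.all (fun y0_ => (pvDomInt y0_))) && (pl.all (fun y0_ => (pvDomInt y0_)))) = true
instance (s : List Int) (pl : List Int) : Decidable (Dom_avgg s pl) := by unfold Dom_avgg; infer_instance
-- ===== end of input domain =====

-- B inverts the traversal: a value→index-list table built in one pass over pl, then one pass over s emitting table[ss]; a different decomposition of the same result.


-- ===== PORT A =====
def avgg (s : List Int) (pl : List Int) : List Int :=
  let s2 := (PySem.List.pyRange 0 (pl.length : Int) 1).foldl (fun s2 i =>
    s.foldl (fun s2 ss => if ss == PySem.List.pyGetD pl i 0 then s2 ++ [i + 1] else s2) s2) []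
  PySem.List.sorted s2 (fun x => x) false

-- ===== PORT B =====
def avgg_alt (s : List Int) (pl : List Int) : List Int :=
  let table : PySem.Dict Int (List Int) :=
    (PySem.List.enumerate pl).foldl (fun d p => d.insert p.2 (d.getD p.2 [] ++ [p.1 + 1])) PySem.Dict.empty
  let out := s.foldl (fun out ss => out ++ table.getD ss []) []
  PySem.List.sorted out (fun x => x) false

-- ===== PRECONDITION & SPEC =====
def Spec_avgg (s : List Int) (pl : List Int) (out : List Int) : Prop := out = avgg_alt s pl
instance (s : List Int) (pl : List Int) (out : List Int) : Decidable (Spec_avgg s pl out) := by unfold Spec_avgg; infer_instance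

-- ===== CLAIM (what is proved, stated in full; the proofs are below) =====
def Claim_equal_avgg : Prop := ∀ (s : List Int) (pl : List Int), Dom_avgg s pl → Spec_avgg s pl (avgg s pl)

-- ===== LEMMAS AND PROOFS =====

-- A's inner scan over s appends i+1 once per occurrence of v in s
theorem inner_scan_eq_replicate (s : List Int) (v x : Int) (acc : List Int) :
    s.foldl (fun a ss => if ss == v then a ++ [x] else a) acc
      = acc ++ List.replicate (s.count v) x := by
  induction s generalizing acc with
  | nil => simp
  | cons h t ih =>
    simp only [List.foldl_cons]
    by_cases hv : h = v
    · rw [if_pos (by simp [hv]), ih, hv, List.count_cons_self, List.replicate_succ]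
      simp
    · rw [if_neg (by simp [hv]), ih]
      simp [hv]

-- the table B builds: value v ↦ the 1-based positions of v in pl
theorem table_getD (E : List (Int × Int)) (d : PySem.Dict Int (List Int)) (c : Int) :
    (E.foldl (fun d p => d.insert p.2 (d.getD p.2 [] ++ [p.1 + 1])) d).getD c []
      = d.getD c [] ++ (E.filter (fun p => p.2 == c)).map (fun p => p.1 + 1) := by
  induction E generalizing d with
  | nil => simp
  | cons h t ih =>
    simp only [List.foldl_cons, ih, List.filter_cons]
    by_cases hv : h.2 = c
    · simp [hv]
    · simp [PySem.Dict.getD_insert, hv, Ne.symm hv]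

-- flatMap of pointwise-appended functions is a permutation of the appended flatMaps
theorem flatMap_append_perm {α β : Type} (s : List α) (g1 g2 : α → List β) :
    (s.flatMap (fun x => g1 x ++ g2 x)).Perm (s.flatMap g1 ++ s.flatMap g2) := by
  induction s with
  | nil => simp
  | cons h t ih =>
    simp only [List.flatMap_cons]
    refine ((ih.append_left (g1 h ++ g2 h)).trans ?_)
    simp only [List.append_assoc]
    exact (List.perm_append_comm_assoc (g2 h) (t.flatMap g1) (t.flatMap g2)).append_left (g1 h)

-- one matched value: scanning s and emitting [x] per match equals a replicate
theorem flatMap_single_match (s : List Int) (v x : Int) :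
    s.flatMap (fun ss => if v == ss then [x] else []) = List.replicate (s.count v) x := by
  induction s with
  | nil => simp
  | cons h t ih =>
    simp only [List.flatMap_cons, ih]
    by_cases hv : v = h
    · simp [hv, List.count_cons_self, List.replicate_succ]
    · simp [hv, List.count_cons_of_ne (by exact fun e => hv e.symm)]

-- the two pre-sort lists are permutations of each other
theorem presort_perm (s : List Int) (E : List (Int × Int)) :
    (s.flatMap (fun ss => (E.filter (fun p => p.2 == ss)).map (fun p => p.1 + 1))).Perm
      (E.flatMap (fun p => List.replicate (s.count p.2) (p.1 + 1))) := by
  induction E with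
  | nil => simp
  | cons q R ih =>
    simp only [List.flatMap_cons, List.filter_cons]
    have heq : (fun ss => ((if q.2 == ss then q :: R.filter (fun p => p.2 == ss)
            else R.filter (fun p => p.2 == ss)).map (fun p => p.1 + 1)))
        = fun ss => (if q.2 == ss then [q.1 + 1] else []) ++
            (R.filter (fun p => p.2 == ss)).map (fun p => p.1 + 1) := by
      funext ss; by_cases h : q.2 = ss <;> simp [h]
    rw [heq]
    refine (flatMap_append_perm s _ _).trans ?_
    rw [flatMap_single_match]
    exact ih.append_left _

theorem avgg_spec_aux (s pl : List Int) : avgg s pl = avgg_alt s pl := by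
  simp only [avgg, avgg_alt]
  simp only [table_getD, PySem.Dict.getD_empty, List.nil_append]
  have hA : (PySem.List.pyRange 0 (pl.length : Int) 1).foldl (fun s2 i =>
        s.foldl (fun s2 ss => if ss == PySem.List.pyGetD pl i 0 then s2 ++ [i + 1] else s2) s2) []
      = (PySem.List.enumerate pl).flatMap (fun p => List.replicate (s.count p.2) (p.1 + 1)) := by
    rw [PySem.List.enumerate_eq_map_pyRange pl 0, List.flatMap_eq_foldl]
    simp only [List.foldl_map]
    apply PySem.List.foldl_congr_mem
    intro acc i _
    rw [inner_scan_eq_replicate]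
  rw [hA, PySem.List.foldl_append_eq_flatMap]
  simp only [List.nil_append]
  exact PySem.List.sorted_eq_sorted_of_perm _ _ _ (fun a b h => h)
    (presort_perm s (PySem.List.enumerate pl)).symm

-- ===== VERDICT (by name: the statement is the Claim_ definition above) =====
theorem avgg_spec : Claim_equal_avgg := by
  intro s pl _
  unfold Spec_avgg
  exact avgg_spec_aux s pl
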